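-- pv_equiv track=rewrite | github.com/Kirill-Pinyaev/ege_inf | 12.06/22.py | f
-- ===== SOURCE A (Python) =====
-- def f(a):
--     d = a
--     c = 0
--     n = 0
--     t = d
--     while n != 144:
--         n += t
--         t += d
--         c += 1
--         if n > 144:
--             return 0
--     if c % 2 != 0:
--         c += 5
--     return c
-- ===== SOURCE B (Python) =====
-- def _isqrt(n):
--     # Newton's method integer square root (pure Python, no imports).
--     if n == 0:
--         return 0
--     x = n
--     y = (x + 1) // 2
--     while y < x:
--         x = y
--         y = (x + n // x) // 2
--     return x
--
--
-- def f(a):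
--     # a*c*(c+1)/2 == 144 has a solution iff a divides 288 and 288//a == c*(c+1);
--     # solve for c directly with an integer square root instead of scanning c upward.
--     if 288 % a != 0:
--         return 0
--     m2 = 288 // a            # must equal c*(c+1)
--     c = _isqrt(m2)
--     if c * (c + 1) != m2:
--         return 0
--     return c + 5 if c % 2 != 0 else c
-- ===== Notes on version B (the rewrite author's own statement) =====
-- stated objective: alternative
-- what changed: Replaces A's upward scan of partial sums by directly solving a*c*(c+1) = 288: check divisibility of 288 by a, then recover c with a Newton integer square root and verify c*(c+1) equals 288//a; Pre_ excludes a <= 0, on which A loops forever and returns nothing.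
-- outside the precondition, e.g. on f(0): A does not finish within the time limit, B raises ZeroDivisionError
import Mathlib
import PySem

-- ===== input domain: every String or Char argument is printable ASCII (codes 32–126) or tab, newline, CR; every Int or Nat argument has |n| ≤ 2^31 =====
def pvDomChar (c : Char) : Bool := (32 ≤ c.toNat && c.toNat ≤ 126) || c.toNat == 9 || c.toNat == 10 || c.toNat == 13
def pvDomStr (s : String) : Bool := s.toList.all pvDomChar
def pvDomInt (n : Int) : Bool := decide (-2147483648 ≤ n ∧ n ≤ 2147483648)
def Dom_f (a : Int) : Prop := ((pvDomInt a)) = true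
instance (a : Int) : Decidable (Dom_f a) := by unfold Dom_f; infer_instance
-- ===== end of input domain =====

-- B solves a*c*(c+1) = 288 directly (divisibility test + Newton integer square root)
-- instead of A's upward scan of partial sums; return values only.

-- ===== PORT A =====
-- A's while loop, state (n, t, c); fuel only guards the recursion (any a ≥ 1 leaves the
-- loop within 17 iterations; for a ≤ 0 Python A loops forever, which Pre_f excludes).
def fPost (c : Int) : Int := if c % 2 ≠ 0 then c + 5 else c

def fLoopA (d : Int) : Nat → Int → Int → Int → Int
  | 0, n, _, c => if n = 144 then fPost c else 0
  | fuel + 1, n, t, c =>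
      if n = 144 then fPost c
      else if n + t > 144 then 0 else fLoopA d fuel (n + t) (t + d) (c + 1)

def f (a : Int) : Int := fLoopA a 201 0 a 0

-- ===== PORT B =====
-- Newton's-method integer square root loop of Source B (fuel guards the recursion only;
-- Newton from x = n needs well under 600 steps for any |n| ≤ 2^31).
def isqrtLoop (n : Int) : Nat → Int → Int → Int
  | 0, x, _ => x
  | fuel + 1, x, y =>
      if y < x then
        isqrtLoop n fuel y (PySem.Int.floordiv (y + PySem.Int.floordiv n y) 2)
      else x

def isqrt (n : Int) : Int :=
  if n = 0 then 0
  else isqrtLoop n 600 n (PySem.Int.floordiv (n + 1) 2)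

def f_alt (a : Int) : Int :=
  if PySem.Int.mod 288 a ≠ 0 then 0
  else
    let m2 := PySem.Int.floordiv 288 a
    let c := isqrt m2
    if c * (c + 1) ≠ m2 then 0
    else if PySem.Int.mod c 2 ≠ 0 then c + 5 else c

-- ===== PRECONDITION & SPEC =====
-- Pre_ excludes exactly a ≤ 0, on which Python A loops forever and never returns.
def Pre_f (a : Int) : Prop := 1 ≤ a
instance (a : Int) : Decidable (Pre_f a) := by unfold Pre_f; infer_instance
def pvWitness_f : Int := 4

def Spec_f (a : Int) (out : Int) : Prop := out = f_alt a
instance (a : Int) (out : Int) : Decidable (Spec_f a out) := by unfold Spec_f; infer_instance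

-- ===== CLAIM =====
def Claim_equal_f : Prop := ∀ (a : Int), Dom_f a → Pre_f a → Spec_f a (f a)

-- ===== LEMMAS AND PROOFS =====

-- the finite part 1 ≤ a ≤ 288, settled by computation
theorem fLoopA_succ (d : Int) (fuel : Nat) (n t c : Int) :
    fLoopA d (fuel + 1) n t c =
      (if n = 144 then fPost c
       else if n + t > 144 then 0 else fLoopA d fuel (n + t) (t + d) (c + 1)) := rfl

set_option maxRecDepth 8192 in
theorem f_eq_alt_small : ∀ n : Fin 288, f ((n : Nat) + 1 : Int) = f_alt ((n : Nat) + 1 : Int) := by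
  decide

-- ===== VERDICT =====
theorem f_spec : Claim_equal_f := by
  intro a _ hpre
  replace hpre : 1 ≤ a := hpre
  show f a = f_alt a
  by_cases hle : a ≤ 288
  · -- 1 ≤ a ≤ 288: instance of the finite check
    have hk : ((a - 1).toNat : Int) = a - 1 := Int.toNat_of_nonneg (by omega)
    have hk2 : (a - 1).toNat < 288 := by omega
    have h := f_eq_alt_small ⟨(a - 1).toNat, hk2⟩
    have ha : f a = f (((a - 1).toNat : Int) + 1) := by rw [hk]; ring_nf
    have hb : f_alt a = f_alt (((a - 1).toNat : Int) + 1) := by rw [hk]; ring_nf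
    rw [ha, hb]; exact h
  · -- a > 288: both sides return 0
    have h1 : f a = 0 := by
      unfold f
      rw [show (201 : Nat) = 200 + 1 from rfl, fLoopA_succ]
      rw [if_neg (by norm_num), if_pos (by omega)]
    have h2 : f_alt a = 0 := by
      unfold f_alt
      have hm : PySem.Int.mod 288 a = 288 := by
        rw [PySem.Int.mod_eq_emod_of_pos (by omega)]
        exact Int.emod_eq_of_lt (by norm_num) (by omega)
      rw [hm]
      simp
    rw [h1, h2]
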